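-- pv_equiv track=rewrite | github.com/DougMouraA/Lista-de-Fundamentos | P2/totalVogaisbrancoResto.py | totalResto
-- ===== SOURCE A (Python) =====
-- def totalResto(frase):
--     contR = 0
--     for i in range(0, len(frase)):
--         if not(frase[i].lower() == "a" or frase[i].lower() == "e" or frase[i].lower() == "i"\
--            or frase[i].lower() == "o" or frase[i].lower() == "u") and \
--            frase[i] != " ":
--             contR += 1
--     return contR
-- ===== SOURCE B (Python) =====
-- def totalResto(frase):
--     # delete every vowel (both cases) and the space from the string, then
--     # the answer is simply the length of what remains
--     for ch in "aeiouAEIOU ":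
--         frase = frase.replace(ch, "")
--     return len(frase)
-- ===== Notes on version B (the rewrite author's own statement) =====
-- stated objective: faster
-- what changed: B never tests or counts characters in Python: it erases each of the eleven excluded characters (both-case vowels and the space) from the string with staged str.replace library passes and returns the length of the residue, instead of A's index loop that lowercases and compares every character five times and increments a counter.
import Mathlib
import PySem

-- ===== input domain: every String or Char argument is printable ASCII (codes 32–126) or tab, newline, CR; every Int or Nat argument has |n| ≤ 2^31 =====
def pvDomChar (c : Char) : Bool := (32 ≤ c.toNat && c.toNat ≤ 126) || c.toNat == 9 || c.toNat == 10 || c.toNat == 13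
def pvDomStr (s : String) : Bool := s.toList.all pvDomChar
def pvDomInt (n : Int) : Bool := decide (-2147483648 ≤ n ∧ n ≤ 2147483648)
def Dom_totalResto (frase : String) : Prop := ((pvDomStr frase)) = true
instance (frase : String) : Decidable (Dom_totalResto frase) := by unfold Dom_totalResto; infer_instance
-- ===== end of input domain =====

-- B deletes the excluded characters with staged str.replace passes and measures the residue (measured faster in CPython); A tests and counts character by character.

-- ===== PORT A =====
def totalResto (frase : String) : Int :=
  (PySem.List.pyRange 0 (PySem.Str.len frase) 1).foldl
    (fun contR i =>
      if !(PySem.Chars.lowerChar (PySem.List.pyGetD frase.toList i ' ') == 'a' ||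
           PySem.Chars.lowerChar (PySem.List.pyGetD frase.toList i ' ') == 'e' ||
           PySem.Chars.lowerChar (PySem.List.pyGetD frase.toList i ' ') == 'i' ||
           PySem.Chars.lowerChar (PySem.List.pyGetD frase.toList i ' ') == 'o' ||
           PySem.Chars.lowerChar (PySem.List.pyGetD frase.toList i ' ') == 'u') &&
         (PySem.List.pyGetD frase.toList i ' ') != ' '
      then contR + 1 else contR) 0

-- ===== PORT B =====
def totalResto_alt (frase : String) : Int :=
  let stripped :=
    "aeiouAEIOU ".toList.foldl (fun s ch => PySem.Str.replace s (String.ofList [ch]) "") frase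
  (PySem.Str.len stripped : Int)

-- ===== PRECONDITION & SPEC =====
def Spec_totalResto (frase : String) (out : Int) : Prop := out = totalResto_alt frase
instance (frase : String) (out : Int) : Decidable (Spec_totalResto frase out) := by unfold Spec_totalResto; infer_instance

-- ===== CLAIM (what is proved, stated in full; the proofs are below) =====
def Claim_equal_totalResto : Prop := ∀ (frase : String), Dom_totalResto frase → Spec_totalResto frase (totalResto frase)

-- ===== LEMMAS AND PROOFS =====

theorem char_toNat_inj {x c : Char} (h : x.toNat = c.toNat) : x = c := by
  have := congrArg Char.ofNat h
  rwa [Char.ofNat_toNat, Char.ofNat_toNat] at this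

theorem charBeq (x c : Char) : (x == c) = (x.toNat == c.toNat) := by
  cases hh : x == c
  · cases hh2 : x.toNat == c.toNat
    · rfl
    · have hx : x = c := char_toNat_inj (eq_of_beq hh2)
      simp [hx] at hh
  · have hx : x = c := eq_of_beq hh
    simp [hx]

theorem charLe (x c : Char) : decide (x ≤ c) = decide (x.toNat ≤ c.toNat) := by
  rw [decide_eq_decide]; exact ge_iff_le

-- A's per-character test equals B's membership test in the excluded characters
theorem test_eq (x : Char) :
    (!(PySem.Chars.lowerChar x == 'a' || PySem.Chars.lowerChar x == 'e' ||
       PySem.Chars.lowerChar x == 'i' || PySem.Chars.lowerChar x == 'o' ||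
       PySem.Chars.lowerChar x == 'u') && x != ' ')
      = !(("aeiouAEIOU ".toList).contains x) := by
  have hl : ("aeiouAEIOU ".toList) = ['a','e','i','o','u','A','E','I','O','U',' '] := by decide
  rw [hl]
  simp only [PySem.Chars.lowerChar, PySem.Chars.isupper, bne, List.contains_eq_any_beq,
    List.any_cons, List.any_nil, charLe]
  by_cases h65 : 65 ≤ x.toNat
  · by_cases h90 : x.toNat ≤ 90
    · rw [if_pos (by simp [h65, h90])]
      have hv : (x.toNat + 32).isValidChar := Or.inl (by omega)
      have ht : (Char.ofNat (x.toNat + 32)).toNat = x.toNat + 32 := by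
        rw [Char.toNat_ofNat, if_pos hv]
      simp only [charBeq, ht]
      rw [Bool.eq_iff_iff]
      simp only [Bool.and_eq_true, Bool.not_eq_true', Bool.or_eq_false_iff, beq_eq_false_iff_ne, ne_eq,
        Bool.not_eq_eq_eq_not, Bool.not_true, Bool.or_eq_true, beq_iff_eq, ht, (show ('a' : Char).toNat = 97 from rfl), (show ('e' : Char).toNat = 101 from rfl), (show ('i' : Char).toNat = 105 from rfl), (show ('o' : Char).toNat = 111 from rfl), (show ('u' : Char).toNat = 117 from rfl), (show ('A' : Char).toNat = 65 from rfl), (show ('E' : Char).toNat = 69 from rfl), (show ('I' : Char).toNat = 73 from rfl), (show ('O' : Char).toNat = 79 from rfl), (show ('U' : Char).toNat = 85 from rfl), (show (' ' : Char).toNat = 32 from rfl)]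
      clear hv ht
      constructor
      · rintro ⟨⟨⟨⟨⟨h1, h2⟩, h3⟩, h4⟩, h5⟩, h6⟩
        exact ⟨by omega, by omega, by omega, by omega, by omega, by omega, by omega, by omega,
          by omega, by omega, by omega, trivial⟩
      · rintro ⟨g1, g2, g3, g4, g5, g6, g7, g8, g9, g10, g11, -⟩
        exact ⟨⟨⟨⟨⟨by omega, by omega⟩, by omega⟩, by omega⟩, by omega⟩, by omega⟩
    · rw [if_neg (by simp [h90])]
      simp only [charBeq]
      rw [Bool.eq_iff_iff]
      simp only [Bool.and_eq_true, Bool.not_eq_true', Bool.or_eq_false_iff, beq_eq_false_iff_ne, ne_eq,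
        Bool.not_eq_eq_eq_not, Bool.not_true, Bool.or_eq_true, beq_iff_eq, (show ('a' : Char).toNat = 97 from rfl), (show ('e' : Char).toNat = 101 from rfl), (show ('i' : Char).toNat = 105 from rfl), (show ('o' : Char).toNat = 111 from rfl), (show ('u' : Char).toNat = 117 from rfl), (show ('A' : Char).toNat = 65 from rfl), (show ('E' : Char).toNat = 69 from rfl), (show ('I' : Char).toNat = 73 from rfl), (show ('O' : Char).toNat = 79 from rfl), (show ('U' : Char).toNat = 85 from rfl), (show (' ' : Char).toNat = 32 from rfl)]
      constructor
      · rintro ⟨⟨⟨⟨⟨h1, h2⟩, h3⟩, h4⟩, h5⟩, h6⟩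
        exact ⟨by omega, by omega, by omega, by omega, by omega, by omega, by omega, by omega,
          by omega, by omega, by omega, trivial⟩
      · rintro ⟨g1, g2, g3, g4, g5, g6, g7, g8, g9, g10, g11, -⟩
        exact ⟨⟨⟨⟨⟨by omega, by omega⟩, by omega⟩, by omega⟩, by omega⟩, by omega⟩
  · rw [if_neg (by simp [h65])]
    simp only [charBeq]
    rw [Bool.eq_iff_iff]
    simp only [Bool.and_eq_true, Bool.not_eq_true', Bool.or_eq_false_iff, beq_eq_false_iff_ne, ne_eq,
      Bool.not_eq_eq_eq_not, Bool.not_true, Bool.or_eq_true, beq_iff_eq, (show ('a' : Char).toNat = 97 from rfl), (show ('e' : Char).toNat = 101 from rfl), (show ('i' : Char).toNat = 105 from rfl), (show ('o' : Char).toNat = 111 from rfl), (show ('u' : Char).toNat = 117 from rfl), (show ('A' : Char).toNat = 65 from rfl), (show ('E' : Char).toNat = 69 from rfl), (show ('I' : Char).toNat = 73 from rfl), (show ('O' : Char).toNat = 79 from rfl), (show ('U' : Char).toNat = 85 from rfl), (show (' ' : Char).toNat = 32 from rfl)]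
    constructor
    · rintro ⟨⟨⟨⟨⟨h1, h2⟩, h3⟩, h4⟩, h5⟩, h6⟩
      exact ⟨by omega, by omega, by omega, by omega, by omega, by omega, by omega, by omega,
        by omega, by omega, by omega, trivial⟩
    · rintro ⟨g1, g2, g3, g4, g5, g6, g7, g8, g9, g10, g11, -⟩
      exact ⟨⟨⟨⟨⟨by omega, by omega⟩, by omega⟩, by omega⟩, by omega⟩, by omega⟩

-- replace.go with a single-character pattern and empty replacement is a filter
theorem replace_go_single (c : Char) (fuel : Nat) (l acc : List Char) (h : l.length ≤ fuel) :
    PySem.Chars.replace.go [c] [] fuel l acc = acc.reverse ++ l.filter (· != c) := by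
  induction fuel generalizing l acc with
  | zero =>
    have : l = [] := List.eq_nil_of_length_eq_zero (Nat.le_zero.mp h)
    subst this; simp [PySem.Chars.replace.go]
  | succ n ih =>
    cases l with
    | nil => simp [PySem.Chars.replace.go]
    | cons x t =>
      simp only [PySem.Chars.replace.go]
      by_cases hx : x = c
      · subst hx
        have hp : List.isPrefixOf [x] (x :: t) = true := by simp [List.isPrefixOf]
        rw [if_pos hp]
        simp only [List.length_cons] at h
        rw [ih _ _ (by simpa using Nat.le_of_succ_le_succ h)]
        simp
      · have hp : List.isPrefixOf [c] (x :: t) = false := by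
          simp [List.isPrefixOf]
          exact fun he => absurd he.symm hx
        rw [if_neg (by simp [hp])]
        simp only [List.length_cons] at h
        rw [ih t (x :: acc) (Nat.le_of_succ_le_succ h)]
        simp [hx]

theorem replace_single (c : Char) (l : List Char) :
    PySem.Chars.replace l [c] [] = l.filter (· != c) := by
  have : ([c] : List Char).isEmpty = false := by simp
  simp only [PySem.Chars.replace, this, Bool.false_eq_true, if_false]
  exact replace_go_single c l.length l [] (le_refl _)

-- the staged replace passes, on the character-list side, are iterated filters
theorem foldl_replace_toList (cs : List Char) (s : String) :
    (cs.foldl (fun s ch => PySem.Str.replace s (String.ofList [ch]) "") s).toList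
      = cs.foldl (fun l c => l.filter (· != c)) s.toList := by
  induction cs generalizing s with
  | nil => simp
  | cons c cs ih =>
    simp only [List.foldl_cons, ih, PySem.Str.toList_replace]
    congr 1
    rw [(by simp : (String.ofList [c]).toList = [c]), (by simp : ("" : String).toList = ([] : List Char))]
    exact replace_single c s.toList

-- iterated single-character deletion = one filter against the whole excluded list
theorem foldl_filter_contains (cs l : List Char) :
    cs.foldl (fun l c => l.filter (· != c)) l = l.filter (fun x => !cs.contains x) := by
  induction cs generalizing l with
  | nil => simp
  | cons c cs ih =>
    simp only [List.foldl_cons, ih, List.filter_filter]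
    apply List.filter_congr
    intro x _
    by_cases hx : x = c <;> simp [hx]

-- ===== VERDICT (by name: the statement is the Claim_ definition above) =====
theorem totalResto_spec : Claim_equal_totalResto := by
  unfold Claim_equal_totalResto
  intro frase _
  unfold Spec_totalResto totalResto totalResto_alt
  rw [PySem.Str.len_eq,
      PySem.List.foldl_pyRange_zero_pyGetD' frase.toList ' '
        (fun contR ch =>
          if !(PySem.Chars.lowerChar ch == 'a' || PySem.Chars.lowerChar ch == 'e' ||
               PySem.Chars.lowerChar ch == 'i' || PySem.Chars.lowerChar ch == 'o' ||
               PySem.Chars.lowerChar ch == 'u') && ch != ' '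
          then contR + 1 else contR) 0,
      PySem.List.foldl_if_add_one]
  simp only [zero_add, PySem.Str.len_eq, foldl_replace_toList, foldl_filter_contains,
      ← List.countP_eq_length_filter]
  congr 1
  apply List.countP_congr
  intro x _
  rw [test_eq]
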